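-- pv_equiv track=rewrite | github.com/butterbuster4/AHS | utils.py | create_matrixs_from_groups_of_tiles
-- ===== SOURCE A (Python) =====
-- import math
--
-- def get_cloest_factors(n):
--     """
--     Get the closest factors of a number n.
--     """
--     factors = []
--     for i in range(1, int(math.sqrt(n) + 1)):
--         if n % i == 0:
--             factors.append(i)
--             factors.append(n // i)
--     return factors[-2:] if len(factors) > 1 else (1, n)  # Return the last two factors which are closest to each other
--
-- def create_matrixs_from_groups_of_tiles(groups):
--     matrixs = []
--     for group in groups:
--         grid_rows, grid_cols = get_cloest_factors(len(group))
--         matrix = [[None for _ in range(grid_cols)] for _ in range(grid_rows)]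
--         for i, tile in enumerate(group):
--             row, col = divmod(i, grid_cols)
--             matrix[row][col] = tile
--         matrixs.append(matrix)
--     return matrixs
-- ===== SOURCE B (Python) =====
-- import math
--
-- def create_matrixs_from_groups_of_tiles(groups):
--     out = []
--     for group in groups:
--         n = len(group)
--         r = max(1, math.isqrt(n))
--         while n % r:
--             r -= 1
--         c = n // r
--         out.append([group[k * c:(k + 1) * c] for k in range(r)])
--     return out
-- ===== Notes on version B (the rewrite author's own statement) =====
-- stated objective: simpler
-- what changed: B finds the row count by scanning a divisor downward from isqrt(n) and builds each row as a direct slice group[k*c:(k+1)*c], replacing A's factor-list accumulation over the whole 1..isqrt range and its None-grid filled cell-by-cell via divmod.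
import Mathlib
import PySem

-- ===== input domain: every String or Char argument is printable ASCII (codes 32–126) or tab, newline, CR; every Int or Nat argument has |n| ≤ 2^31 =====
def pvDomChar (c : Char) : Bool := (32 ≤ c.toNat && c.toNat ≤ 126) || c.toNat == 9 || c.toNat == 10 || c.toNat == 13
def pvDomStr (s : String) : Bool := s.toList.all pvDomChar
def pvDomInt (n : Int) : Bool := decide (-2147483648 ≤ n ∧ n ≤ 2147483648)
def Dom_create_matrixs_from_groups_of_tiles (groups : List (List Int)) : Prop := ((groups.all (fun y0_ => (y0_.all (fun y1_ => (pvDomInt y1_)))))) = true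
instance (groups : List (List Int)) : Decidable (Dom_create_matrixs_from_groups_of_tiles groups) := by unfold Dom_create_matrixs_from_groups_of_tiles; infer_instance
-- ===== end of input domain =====

-- B replaces A's None-grid + divmod fill with direct chunk slicing (and a downward divisor scan): simpler decomposition, same results.

-- ===== PORT A =====
-- loop body of get_cloest_factors: append [i, n // i] when n % i == 0
def pvStepA (n : Int) (acc : List Int) (i : Int) : List Int :=
  if PySem.Int.mod n i = 0 then acc ++ [i, PySem.Int.floordiv n i] else acc

-- int(math.sqrt(n) + 1) = Nat.sqrt n + 1 for 0 ≤ n ≤ 2^31 (float sqrt cannot cross an integer boundary there)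
def get_cloest_factors (n : Int) : Int × Int :=
  let factors := (PySem.List.pyRange 1 ((Nat.sqrt n.toNat : Int) + 1) 1).foldl (pvStepA n) []
  if factors.length > 1 then
    -- factors[-2:] unpacked into the two variables (always exactly two elements when length > 1)
    (factors.getD (factors.length - 2) 0, factors.getD (factors.length - 1) 0)
  else (1, n)

-- matrix[row][col] = tile with row, col = divmod(i, grid_cols)
def pvFillStep (c : Int) (m : List (List (Option Int))) (p : Int × Int) : List (List (Option Int)) :=
  m.modify (PySem.Int.floordiv p.1 c).toNat (fun row => row.set (PySem.Int.mod p.1 c).toNat (some p.2))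

-- per-group body of A's loop
def pvBodyA (group : List Int) : List (List (Option Int)) :=
  let rc := get_cloest_factors (group.length : Int)
  let matrix := (List.range rc.1.toNat).map (fun _ => (List.range rc.2.toNat).map (fun _ => (none : Option Int)))
  (PySem.List.enumerate group).foldl (pvFillStep rc.2) matrix

def create_matrixs_from_groups_of_tiles (groups : List (List Int)) : List (List (List (Option Int))) :=
  groups.foldl (fun matrixs group => matrixs ++ [pvBodyA group]) []

-- ===== PORT B =====
-- the `while n % r: r -= 1` scan, counting r down
def pvScanDown (n : Nat) : Nat → Nat
  | 0 => 0
  | r + 1 => if n % (r + 1) = 0 then r + 1 else pvScanDown n r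

-- per-group body of B: row k is the slice group[k*c:(k+1)*c]
def pvBodyB (group : List Int) : List (List (Option Int)) :=
  let n := group.length
  let r := pvScanDown n (max 1 (Nat.sqrt n))
  let c := n / r
  (List.range r).map (fun k =>
    (PySem.List.slice group (some ((k * c : Nat) : Int)) (some ((((k + 1) * c : Nat)) : Int))).map some)

def create_matrixs_from_groups_of_tiles_alt (groups : List (List Int)) : List (List (List (Option Int))) :=
  groups.map pvBodyB

-- ===== PRECONDITION & SPEC =====
def Spec_create_matrixs_from_groups_of_tiles (groups : List (List Int)) (out : List (List (List (Option Int)))) : Prop := out = create_matrixs_from_groups_of_tiles_alt groups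
instance (groups : List (List Int)) (out : List (List (List (Option Int)))) : Decidable (Spec_create_matrixs_from_groups_of_tiles groups out) := by unfold Spec_create_matrixs_from_groups_of_tiles; infer_instance

-- ===== CLAIM (what is proved, stated in full; the proofs are below) =====
def Claim_equal_create_matrixs_from_groups_of_tiles : Prop := ∀ (groups : List (List Int)), Dom_create_matrixs_from_groups_of_tiles groups → Spec_create_matrixs_from_groups_of_tiles groups (create_matrixs_from_groups_of_tiles groups)

-- ===== LEMMAS AND PROOFS =====

-- the factor list A builds, recast as a Nat-indexed recursion on the range bound
def pvF (n : Nat) : Nat → List Int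
  | 0 => []
  | m + 1 => pvF n m ++ (if n % (m + 1) = 0 then [((m + 1 : Nat) : Int), ((n / (m + 1) : Nat) : Int)] else [])

lemma pvFoldA (n m : Nat) :
    (PySem.List.pyRange 1 ((m : Int) + 1) 1).foldl (pvStepA (n : Int)) [] = pvF n m := by
  induction m with
  | zero => simp [PySem.List.pyRange_one_eq_nil, pvF]
  | succ m ih =>
    have hcast : ((m + 1 : Nat) : Int) + 1 = ((m : Int) + 1) + 1 := by push_cast; ring
    rw [hcast, PySem.List.pyRange_one_succ_right (by omega), List.foldl_append, ih]
    show pvStepA (n : Int) (pvF n m) ((m : Int) + 1) = pvF n (m + 1)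
    have h1 : ((m : Int) + 1) = ((m + 1 : Nat) : Int) := by push_cast; ring
    rw [pvStepA, h1, PySem.Int.mod_natCast, PySem.Int.floordiv_natCast, pvF]
    simp only [Int.natCast_eq_zero]
    by_cases h : n % (m + 1) = 0
    · simp [h]
    · simp [h]

lemma pvScanDown_spec (n : Nat) : ∀ m : Nat, 0 < m →
    0 < pvScanDown n m ∧ pvScanDown n m ≤ m ∧ n % pvScanDown n m = 0 := by
  intro m
  induction m with
  | zero => omega
  | succ m ih =>
    intro _
    by_cases h : n % (m + 1) = 0
    · simp [pvScanDown, h]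
    · rcases Nat.eq_zero_or_pos m with hm | hm
      · subst hm; simp [Nat.mod_one] at h
      · have := ih hm
        simp only [pvScanDown, if_neg h]
        exact ⟨this.1, by omega, this.2.2⟩

lemma pvF_scan (n : Nat) : ∀ m : Nat, pvF n m = pvF n (pvScanDown n m) := by
  intro m
  induction m with
  | zero => rfl
  | succ m ih =>
    by_cases h : n % (m + 1) = 0
    · simp [pvScanDown, h]
    · simp only [pvScanDown, pvF, h]
      simpa using ih

lemma pvGetD_append2 (l : List Int) (a b : Int) :
    (l ++ [a, b]).getD l.length 0 = a ∧ (l ++ [a, b]).getD (l.length + 1) 0 = b := by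
  constructor <;> simp [List.getD]

lemma pvPair (n : Nat) (hn : 0 < n) :
    get_cloest_factors (n : Int) =
      (((pvScanDown n (Nat.sqrt n) : Nat) : Int), ((n / pvScanDown n (Nat.sqrt n) : Nat) : Int)) := by
  have hsq : 0 < Nat.sqrt n := Nat.sqrt_pos.mpr hn
  obtain ⟨hs0, hsle, hsmod⟩ := pvScanDown_spec n (Nat.sqrt n) hsq
  set s := pvScanDown n (Nat.sqrt n) with hs
  obtain ⟨t, ht⟩ : ∃ t, s = t + 1 := ⟨s - 1, by omega⟩
  have hF : pvF n (Nat.sqrt n) = pvF n t ++ [((s : Nat) : Int), ((n / s : Nat) : Int)] := by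
    rw [pvF_scan n (Nat.sqrt n), ← hs, ht]
    have hmod : n % (t + 1) = 0 := by rw [← ht]; exact hsmod
    simp [pvF, hmod]
  unfold get_cloest_factors
  have htn : ((n : Int)).toNat = n := Int.toNat_natCast n
  rw [htn, pvFoldA, hF]
  have hlen : (pvF n t ++ [((s : Nat) : Int), ((n / s : Nat) : Int)]).length = (pvF n t).length + 2 := by
    simp
  rw [if_pos (by omega)]
  have h2 := pvGetD_append2 (pvF n t) ((s : Nat) : Int) ((n / s : Nat) : Int)
  have e1 : (pvF n t).length + 2 - 2 = (pvF n t).length := by omega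
  have e2 : (pvF n t).length + 2 - 1 = (pvF n t).length + 1 := by omega
  rw [hlen, e1, e2, h2.1, h2.2]

lemma pvTakeSet (g : List (Option Int)) (t : Nat) (v : Option Int) :
    ∀ _ : t < g.length, (g.set t v).take (t + 1) = g.take t ++ [v] := by
  induction g generalizing t with
  | nil => intro h; simp at h
  | cons a g ih =>
    intro h
    cases t with
    | zero => simp
    | succ t =>
      have h' : t < g.length := by simpa using h
      simp [ih t h']

lemma pvFillRow (c : Nat) (L1 : List Int) : ∀ (t : Nat) (g : List (Option Int)) (G : List (List (Option Int))),
    t + L1.length ≤ c → g.length = c →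
    (PySem.List.enumerate L1 (t : Int)).foldl (pvFillStep (c : Int)) (g :: G)
      = (g.take t ++ L1.map some ++ g.drop (t + L1.length)) :: G := by
  induction L1 with
  | nil => intro t g G _ _; simp
  | cons x L1 ih =>
    intro t g G ht hg
    have htc : t < c := by simp at ht; omega
    rw [PySem.List.enumerate_cons, List.foldl_cons]
    have hstep : pvFillStep (c : Int) (g :: G) ((t : Int), x) = (g.set t (some x)) :: G := by
      unfold pvFillStep
      simp only [PySem.Int.floordiv_natCast, PySem.Int.mod_natCast, Int.toNat_natCast]
      rw [Nat.div_eq_of_lt htc, Nat.mod_eq_of_lt htc]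
      simp [List.modify]
    rw [hstep]
    have hc1 : ((t : Int) + 1) = ((t + 1 : Nat) : Int) := by push_cast; ring
    rw [hc1, ih (t + 1) (g.set t (some x)) G (by simp at ht ⊢; omega) (by simp [hg])]
    have htake := pvTakeSet g t (some x) (by omega)
    have hdrop : (g.set t (some x)).drop (t + 1 + L1.length) = g.drop (t + 1 + L1.length) :=
      List.drop_set_of_lt (by omega)
    rw [htake, hdrop]
    simp only [List.map_cons, List.length_cons]
    have e : t + (L1.length + 1) = t + 1 + L1.length := by omega
    rw [e]
    simp

lemma pvFillShift (c : Nat) (hc : 0 < c) (L2 : List Int) : ∀ (t : Nat) (g : List (Option Int)) (G : List (List (Option Int))),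
    (PySem.List.enumerate L2 ((c + t : Nat) : Int)).foldl (pvFillStep (c : Int)) (g :: G)
      = g :: (PySem.List.enumerate L2 (t : Int)).foldl (pvFillStep (c : Int)) G := by
  induction L2 with
  | nil => intro t g G; simp
  | cons x L2 ih =>
    intro t g G
    rw [PySem.List.enumerate_cons, PySem.List.enumerate_cons, List.foldl_cons, List.foldl_cons]
    have hstep : pvFillStep (c : Int) (g :: G) (((c + t : Nat) : Int), x)
        = g :: pvFillStep (c : Int) G ((t : Int), x) := by
      unfold pvFillStep
      simp only [PySem.Int.floordiv_natCast, PySem.Int.mod_natCast, Int.toNat_natCast]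
      rw [show c + t = t + c from Nat.add_comm c t, Nat.add_div_right t hc, Nat.add_mod_right]
      simp [List.modify]
    rw [hstep]
    have h1 : ((c + t : Nat) : Int) + 1 = ((c + (t + 1) : Nat) : Int) := by omega
    have h2 : ((t : Nat) : Int) + 1 = ((t + 1 : Nat) : Int) := by omega
    rw [h1, h2, ih (t + 1)]

lemma pvEnumAppend (xs ys : List Int) : ∀ s : Int,
    PySem.List.enumerate (xs ++ ys) s = PySem.List.enumerate xs s ++ PySem.List.enumerate ys (s + xs.length) := by
  induction xs with
  | nil => intro s; simp
  | cons x xs ih =>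
    intro s
    rw [List.cons_append, PySem.List.enumerate_cons, PySem.List.enumerate_cons, ih (s + 1)]
    simp only [List.cons_append, List.length_cons]
    congr 2
    push_cast
    ring

lemma pvFillMain (c : Nat) (hc : 0 < c) : ∀ (G : List (List (Option Int))) (L : List Int),
    (∀ row ∈ G, row.length = c) → L.length = G.length * c →
    (PySem.List.enumerate L 0).foldl (pvFillStep (c : Int)) G
      = (List.range G.length).map (fun k => ((L.drop (k * c)).take c).map some) := by
  intro G
  induction G with
  | nil =>
    intro L _ hlen
    have hL : L = [] := List.length_eq_zero_iff.mp (by simpa using hlen)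
    subst hL
    simp
  | cons g G ih =>
    intro L hrows hlen
    have hL : L.length = c + G.length * c := by
      rw [hlen]; simp [List.length_cons]; ring
    have hcle : c ≤ L.length := by omega
    have htk : (L.take c).length = c := by simp [Nat.min_eq_left hcle]
    have hg : g.length = c := hrows g (by simp)
    conv_lhs => rw [show L = L.take c ++ L.drop c from (List.take_append_drop c L).symm]
    rw [pvEnumAppend, List.foldl_append]
    have hstart : (0 : Int) + ((L.take c).length : Int) = ((c + 0 : Nat) : Int) := by
      rw [htk]; push_cast; ring
    rw [hstart]
    have hrow := pvFillRow c (L.take c) 0 g G (by simp [htk]) hg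
    simp only [Nat.cast_zero] at hrow
    rw [hrow]
    have hrowval : g.take 0 ++ (L.take c).map some ++ g.drop (0 + (L.take c).length) = (L.take c).map some := by
      rw [htk]
      simp [List.drop_eq_nil_of_le (le_of_eq hg)]
    rw [hrowval]
    rw [pvFillShift c hc (L.drop c) 0 ((L.take c).map some) G]
    simp only [Nat.cast_zero] at *
    rw [ih (L.drop c) (fun r hr => hrows r (by simp [hr])) (by simp; omega)]
    simp only [List.length_cons, List.range_succ_eq_map, List.map_cons, Nat.zero_mul,
      List.drop_zero, List.map_map]
    congr 1
    apply List.map_congr_left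
    intro k _
    simp only [Function.comp_apply, List.drop_drop]
    have e : c + k * c = Nat.succ k * c := by rw [Nat.succ_mul]; omega
    rw [e]

-- per-group equality
lemma pvBody_eq (group : List Int) : pvBodyA group = pvBodyB group := by
  by_cases h0 : group.length = 0
  · have hnil : group = [] := List.length_eq_zero_iff.mp h0
    subst hnil
    decide
  · have hn : 0 < group.length := Nat.pos_of_ne_zero h0
    obtain ⟨hs0, hsle, hsmod⟩ :=
      pvScanDown_spec group.length (Nat.sqrt group.length) (Nat.sqrt_pos.mpr hn)
    have hdvd : pvScanDown group.length (Nat.sqrt group.length) ∣ group.length :=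
      Nat.dvd_of_mod_eq_zero hsmod
    have hc : 0 < group.length / pvScanDown group.length (Nat.sqrt group.length) :=
      Nat.div_pos (Nat.le_of_dvd hn hdvd) hs0
    unfold pvBodyA pvBodyB
    dsimp only
    rw [pvPair group.length hn, Nat.max_eq_right (Nat.sqrt_pos.mpr hn)]
    simp only [Int.toNat_natCast]
    rw [pvFillMain _ hc _ group
      (by intro row hrow; rcases List.mem_map.mp hrow with ⟨k, -, rfl⟩; simp)
      (by simp only [List.length_map, List.length_range]; exact (Nat.mul_div_cancel' hdvd).symm)]
    simp only [List.length_map, List.length_range]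
    apply List.map_congr_left
    intro k _
    rw [PySem.List.slice_natCast]
    have e : (k + 1) * (group.length / pvScanDown group.length (Nat.sqrt group.length)) -
        k * (group.length / pvScanDown group.length (Nat.sqrt group.length)) =
        group.length / pvScanDown group.length (Nat.sqrt group.length) := by
      rw [Nat.succ_mul]; omega
    rw [e]

-- ===== VERDICT (by name: the statement is the Claim_ definition above) =====
theorem create_matrixs_from_groups_of_tiles_spec : Claim_equal_create_matrixs_from_groups_of_tiles := by
  intro groups _
  unfold Spec_create_matrixs_from_groups_of_tiles create_matrixs_from_groups_of_tiles create_matrixs_from_groups_of_tiles_alt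
  rw [PySem.List.foldl_append_singleton_eq_map pvBodyA groups []]
  simp only [List.nil_append]
  exact List.map_congr_left (fun g _ => pvBody_eq g)
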